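-- pv_equiv track=rewrite | github.com/SyrDan/Ai-analyzer | advanced_analyzer.py | generate_flashcards
-- ===== SOURCE A (Python) =====
-- def generate_flashcards(text, keywords):
--     """
--     Генерирует карточки для запоминания на основе ключевых слов
--     """
--     flashcards = []
--     sentences = [s.strip() for s in text.split('.') if s.strip()]
--
--     for keyword in keywords[:5]:
--         # Находим предложение с этим ключевым словом
--         for sentence in sentences:
--             if keyword.lower() in sentence.lower():
--                 flashcards.append({
--                     'front': f"Что такое {keyword}?",
--                     'back': sentence,
--                     'keyword': keyword
--                 })
--                 break
--
--     return flashcards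
-- ===== SOURCE B (Python) =====
-- def generate_flashcards(text, keywords):
--     """
--     Генерирует карточки для запоминания на основе ключевых слов
--     """
--     sentences = [s.strip() for s in text.split('.') if s.strip()]
--
--     def go(kws):
--         # recursion over the keyword list; output is built back-to-front
--         if not kws:
--             return []
--         keyword, rest = kws[0], kws[1:]
--         tail = go(rest)
--         matches = [s for s in sentences if keyword.lower() in s.lower()]
--         if matches:
--             return [{
--                 'front': f"Что такое {keyword}?",
--                 'back': matches[0],
--                 'keyword': keyword
--             }] + tail
--         return tail
--
--     return go(keywords[:5])
-- ===== Notes on version B (the rewrite author's own statement) =====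
-- stated objective: alternative
-- what changed: Replaces A's iterative accumulator loop with an early break by a recursion over keywords[:5] that filters the complete list of matching sentences per keyword, takes its head, and builds the result back-to-front by prepending to the recursive tail.
import Mathlib
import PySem

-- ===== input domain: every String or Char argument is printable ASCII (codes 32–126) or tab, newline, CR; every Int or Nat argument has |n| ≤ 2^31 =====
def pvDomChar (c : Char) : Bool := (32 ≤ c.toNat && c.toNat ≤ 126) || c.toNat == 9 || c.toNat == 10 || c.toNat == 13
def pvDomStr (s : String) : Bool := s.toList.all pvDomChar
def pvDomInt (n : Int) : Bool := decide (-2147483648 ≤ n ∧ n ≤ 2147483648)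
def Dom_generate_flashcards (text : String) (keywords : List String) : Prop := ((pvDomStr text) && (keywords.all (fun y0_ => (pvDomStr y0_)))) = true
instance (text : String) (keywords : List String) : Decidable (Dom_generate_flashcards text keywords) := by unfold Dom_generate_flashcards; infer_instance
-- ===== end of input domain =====

-- B replaces A's accumulator loop with early break by a recursion over keywords[:5]
-- that filters all matching sentences per keyword, takes the head, and builds the
-- result back-to-front (objective: alternative).

-- helpers shared by both ports (both Pythons build the same card dict and sentence list)
def pvCard (keyword sentence : String) : List (String × String) :=
  [("front", "Что такое " ++ keyword ++ "?"), ("back", sentence), ("keyword", keyword)]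

def pvSentences (text : String) : List String :=
  (((PySem.Str.split? text ".").getD []).map PySem.Str.strip).filter (fun s => s ≠ "")

-- ===== PORT A =====
-- inner 'for sentence in sentences: … break' of A
def pvFindA (keyword : String) : List String → Option String
  | [] => none
  | s :: rest =>
      if PySem.Str.isIn (PySem.Str.lower keyword) (PySem.Str.lower s) then some s
      else pvFindA keyword rest

def generate_flashcards (text : String) (keywords : List String) : List (List (String × String)) :=
  let sentences := pvSentences text
  (PySem.List.slice keywords none (some 5)).foldl
    (fun acc keyword =>
      match pvFindA keyword sentences with
      | some s => acc ++ [pvCard keyword s]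
      | none => acc) []

-- ===== PORT B =====
-- 'matches = [s for s in sentences if keyword.lower() in s.lower()]' of B
def pvMatchesB (keyword : String) (sentences : List String) : List String :=
  sentences.filter (fun s => PySem.Str.isIn (PySem.Str.lower keyword) (PySem.Str.lower s))

-- B's recursive 'go' over the keyword list
def pvGoB (sentences : List String) : List String → List (List (String × String))
  | [] => []
  | keyword :: rest =>
      let tail := pvGoB sentences rest
      match pvMatchesB keyword sentences with
      | s :: _ => pvCard keyword s :: tail
      | [] => tail

def generate_flashcards_alt (text : String) (keywords : List String) : List (List (String × String)) :=
  let sentences := pvSentences text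
  pvGoB sentences (PySem.List.slice keywords none (some 5))

-- ===== PRECONDITION & SPEC =====
def Spec_generate_flashcards (text : String) (keywords : List String) (out : List (List (String × String))) : Prop := out = generate_flashcards_alt text keywords
instance (text : String) (keywords : List String) (out : List (List (String × String))) : Decidable (Spec_generate_flashcards text keywords out) := by unfold Spec_generate_flashcards; infer_instance

-- ===== CLAIM (what is proved, stated in full; the proofs are below) =====
def Claim_equal_generate_flashcards : Prop := ∀ (text : String) (keywords : List String), Dom_generate_flashcards text keywords → Spec_generate_flashcards text keywords (generate_flashcards text keywords)

-- ===== LEMMAS AND PROOFS =====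

-- A's first-match search equals the head of B's full filter
lemma pvFindA_eq_head (kw : String) (ss : List String) :
    pvFindA kw ss = (pvMatchesB kw ss).head? := by
  induction ss with
  | nil => rfl
  | cons s rest ih =>
      simp only [pvFindA, pvMatchesB, List.filter_cons]
      split_ifs with h
      · simp
      · simpa [pvMatchesB] using ih

-- A's left fold equals acc ++ B's back-to-front recursion
lemma pvFold_eq_go (ss : List String) (top : List String)
    (acc : List (List (String × String))) :
    top.foldl
      (fun acc keyword =>
        match pvFindA keyword ss with
        | some s => acc ++ [pvCard keyword s]
        | none => acc) acc = acc ++ pvGoB ss top := by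
  induction top generalizing acc with
  | nil => simp [pvGoB]
  | cons kw rest ih =>
      simp only [List.foldl_cons, pvGoB]
      rw [pvFindA_eq_head]
      cases h : pvMatchesB kw ss with
      | nil => simp [ih]
      | cons s _ => simp [ih]

-- ===== VERDICT (by name: the statement is the Claim_ definition above) =====
theorem generate_flashcards_spec : Claim_equal_generate_flashcards := by
  intro text keywords _
  unfold Spec_generate_flashcards generate_flashcards generate_flashcards_alt
  simpa using pvFold_eq_go (pvSentences text) (PySem.List.slice keywords none (some 5)) []
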